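-- pv_equiv track=rewrite | github.com/Jakubhl/Work | TRIMAZKON/pipe_server/untitled2.py | get_cutoff_date
-- ===== SOURCE A (Python) =====
-- def calc_days_in_month(current_month):
--     months_30days = [4,6,9,11]
--     if current_month == 2:
--         days_in_month = 28
--     elif current_month in months_30days:
--         days_in_month = 30
--     else:
--         days_in_month = 31
--
--     return days_in_month
--
-- def get_cutoff_date(days):
--
--     # current_date = Deleting.get_current_date()
--     current_date = "03.12.2024"
--     # current_day, current_month, current_year = current_date[1].split(".")
--     current_day, current_month, current_year = current_date.split(".")
--     day = int(current_day)
--     month = int(current_month)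
--     year = int(current_year)
--
--     while days > 0:
--         day -= 1
--         if day == 0:
--             month -= 1
--             if month ==0:
--                 month = 12
--                 year -= 1
--             day = calc_days_in_month(month)
--
--         days -= 1
--     return [day,month,year]
-- ===== SOURCE B (Python) =====
-- _CUM = [0, 31, 59, 90, 120, 151, 181, 212, 243, 273, 304, 334]
--
-- def _from_ordinal(total):
--     # total = ordinal of the result day counted from Jan 1, 2024 (= day 1), 365-day years
--     year = 2024 + (total - 1) // 365
--     o = (total - 1) % 365 + 1          # 1..365, day-of-year
--     month = 12
--     while _CUM[month - 1] >= o: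
--         month -= 1
--     return [o - _CUM[month - 1], month, year]
--
-- def get_cutoff_date(days):
--     # 03.12.2024 is day 337 of its year (334 days before December + 3)
--     return _from_ordinal(337 - max(days, 0))
-- ===== Notes on version B (the rewrite author's own statement) =====
-- stated objective: faster
-- what changed: A counts back one day per loop iteration; B converts the fixed start date to a day-of-year ordinal and computes year, month and day directly with floor division/modulo by 365 and a 12-entry cumulative month-length table.
import Mathlib
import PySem

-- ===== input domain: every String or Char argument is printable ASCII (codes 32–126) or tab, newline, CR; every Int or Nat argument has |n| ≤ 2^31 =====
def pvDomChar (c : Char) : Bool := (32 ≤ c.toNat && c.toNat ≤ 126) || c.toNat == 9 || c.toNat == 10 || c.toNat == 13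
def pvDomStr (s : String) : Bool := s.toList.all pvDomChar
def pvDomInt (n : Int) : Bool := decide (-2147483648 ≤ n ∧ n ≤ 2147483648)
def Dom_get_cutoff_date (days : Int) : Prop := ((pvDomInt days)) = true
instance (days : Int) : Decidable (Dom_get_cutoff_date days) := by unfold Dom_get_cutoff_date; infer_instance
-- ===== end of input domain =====

-- B replaces A's day-by-day countdown loop with direct arithmetic on a 365-day-year
-- ordinal plus a 12-entry cumulative month table (objective: faster).

-- ===== PORT A =====
def calc_days_in_month (current_month : Int) : Int :=
  let months_30days : List Int := [4, 6, 9, 11]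
  if current_month = 2 then 28
  else if months_30days.contains current_month then 30
  else 31

-- the while-loop of A, recursing on days (decremented by 1 each pass, exits at days ≤ 0)
def get_cutoff_date_loop (days day month year : Int) : List Int :=
  if h : days > 0 then
    let day1 := day - 1
    if day1 = 0 then
      let month1 := month - 1
      if month1 = 0 then
        get_cutoff_date_loop (days - 1) (calc_days_in_month 12) 12 (year - 1)
      else
        get_cutoff_date_loop (days - 1) (calc_days_in_month month1) month1 year
    else
      get_cutoff_date_loop (days - 1) day1 month year
  else [day, month, year]
termination_by days.toNat
decreasing_by all_goals omega

def get_cutoff_date (days : Int) : List Int :=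
  let current_date := "03.12.2024"
  -- split/int() ported via PySem; the literal splits into three int-like parts,
  -- so the getD defaults are never taken (exact)
  let parts := (PySem.Str.split? current_date ".").getD []
  let day := (PySem.Int.ofStr? (parts.getD 0 "")).getD 0
  let month := (PySem.Int.ofStr? (parts.getD 1 "")).getD 0
  let year := (PySem.Int.ofStr? (parts.getD 2 "")).getD 0
  get_cutoff_date_loop days day month year

-- ===== PORT B =====
def cumB : List Int := [0, 31, 59, 90, 120, 151, 181, 212, 243, 273, 304, 334]

-- the `while _CUM[month-1] >= o: month -= 1` loop of Source B, month counting down from 12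
def findMonth : Nat → Int → Int
  | 0, _ => 0
  | m + 1, o => if cumB.getD m 0 ≥ o then findMonth m o else (m + 1 : Int)

def from_ordinal (total : Int) : List Int :=
  let year := 2024 + PySem.Int.floordiv (total - 1) 365
  let o := PySem.Int.mod (total - 1) 365 + 1
  let month := findMonth 12 o
  [o - cumB.getD (month - 1).toNat 0, month, year]

def get_cutoff_date_alt (days : Int) : List Int :=
  from_ordinal (337 - max days 0)

-- ===== PRECONDITION & SPEC =====
def Spec_get_cutoff_date (days : Int) (out : List Int) : Prop := out = get_cutoff_date_alt days
instance (days : Int) (out : List Int) : Decidable (Spec_get_cutoff_date days out) := by unfold Spec_get_cutoff_date; infer_instance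

-- ===== CLAIM (what is proved, stated in full; the proofs are below) =====
def Claim_equal_get_cutoff_date : Prop := ∀ (days : Int), Dom_get_cutoff_date days → Spec_get_cutoff_date days (get_cutoff_date days)

-- ===== LEMMAS AND PROOFS =====

-- valid calendar state: month 1..12, day within that month
def invDM (day month : Int) : Prop :=
  1 ≤ month ∧ month ≤ 12 ∧ 1 ≤ day ∧ day ≤ calc_days_in_month month

-- day-of-year ordinal (within a 365-day year) of a state
def dOrd (day month : Int) : Int := cumB.getD (month - 1).toNat 0 + day

lemma calc_pos (m : Int) : 1 ≤ calc_days_in_month m := by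
  unfold calc_days_in_month; norm_num; split_ifs <;> norm_num

-- consecutive cumulative-table differences are the month lengths (finite check)
lemma cum_diff : ∀ m : Nat, m < 12 → 1 ≤ m →
    cumB.getD m 0 = cumB.getD (m - 1) 0 + calc_days_in_month (m : Int) := by decide

-- cumB is monotone on indices 0..11 (finite check)
lemma cum_mono : ∀ i : Nat, i < 12 → ∀ j : Nat, j < 12 → i ≤ j →
    cumB.getD i 0 ≤ cumB.getD j 0 := by decide

lemma dOrd_bounds (day month : Int) (h : invDM day month) :
    1 ≤ dOrd day month ∧ dOrd day month ≤ 365 := by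
  obtain ⟨h1, h2, h3, h4⟩ := h
  interval_cases month <;>
    simp_all [dOrd, calc_days_in_month, cumB, List.getD] <;> omega

lemma findMonth_eq (m : Nat) (o : Int) (hm1 : 1 ≤ m) (hm12 : m ≤ 12)
    (hlo : cumB.getD (m - 1) 0 < o)
    (hhi : m = 12 ∨ o ≤ cumB.getD m 0) :
    ∀ k : Nat, m ≤ k → k ≤ 12 → findMonth k o = (m : Int) := by
  intro k
  induction k with
  | zero => omega
  | succ j ihj =>
    intro hmk hk12
    rcases Nat.lt_or_ge j m with hjm | hjm
    · -- j + 1 = m : the loop stops here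
      have hj : j = m - 1 := by omega
      subst hj
      rw [findMonth]
      rw [if_neg (by omega)]
      omega
    · -- j ≥ m : condition holds, loop continues
      have hom : o ≤ cumB.getD j 0 := by
        rcases hhi with h12 | hle
        · omega
        · exact le_trans hle (cum_mono m (by omega) j (by omega) hjm)
      rw [findMonth, if_pos (by omega)]
      exact ihj hjm (by omega)

lemma from_ordinal_eq (day month year : Int) (h : invDM day month) :
    from_ordinal (365 * (year - 2024) + dOrd day month) = [day, month, year] := by
  have hb := dOrd_bounds day month h
  obtain ⟨h1, h2, h3, h4⟩ := h
  set t := 365 * (year - 2024) + dOrd day month with ht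
  have hdiv : PySem.Int.floordiv (t - 1) 365 = year - 2024 := by
    rw [PySem.Int.floordiv_eq_ediv_of_pos (by norm_num)]
    omega
  have hmod : PySem.Int.mod (t - 1) 365 = dOrd day month - 1 := by
    rw [PySem.Int.mod_eq_emod_of_pos (by norm_num)]
    omega
  have hmn : month = ((month.toNat : Nat) : Int) := by omega
  have hton : (month - 1).toNat = month.toNat - 1 := by omega
  have hfind : findMonth 12 (dOrd day month) = month := by
    have hlo : cumB.getD (month.toNat - 1) 0 < dOrd day month := by
      rw [dOrd, hton]; omega
    have hhi : month.toNat = 12 ∨ dOrd day month ≤ cumB.getD month.toNat 0 := by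
      rcases eq_or_lt_of_le h2 with h12 | hlt
      · left; omega
      · right
        have hd := cum_diff month.toNat (by omega) (by omega)
        rw [← hmn] at hd
        rw [dOrd, hton]
        omega
    have h := findMonth_eq month.toNat (dOrd day month) (by omega) (by omega) hlo hhi 12 (by omega) (by omega)
    rw [← hmn] at h
    exact h
  simp only [from_ordinal]
  rw [hdiv, hmod]
  have he : dOrd day month - 1 + 1 = dOrd day month := by omega
  rw [he, hfind]
  have hday : dOrd day month - cumB.getD (month - 1).toNat 0 = day := by
    simp [dOrd]
  rw [hday]
  have hy : 2024 + (year - 2024) = year := by omega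
  rw [hy]

lemma loop_eq_from_ordinal (n : Nat) :
    ∀ (days day month year : Int), days.toNat = n → invDM day month →
      get_cutoff_date_loop days day month year =
        from_ordinal (365 * (year - 2024) + dOrd day month - max days 0) := by
  induction n with
  | zero =>
    intro days day month year hn hinv
    have hd : ¬ days > 0 := by omega
    rw [get_cutoff_date_loop, dif_neg hd]
    have hmx : max days 0 = 0 := by omega
    rw [hmx, sub_zero, from_ordinal_eq day month year hinv]
  | succ k ih =>
    intro days day month year hn hinv
    have hd : days > 0 := by omega
    have hk : (days - 1).toNat = k := by omega
    have hmx : max days 0 = days := by omega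
    have hmx' : max (days - 1) 0 = days - 1 := by omega
    obtain ⟨h1, h2, h3, h4⟩ := hinv
    rw [get_cutoff_date_loop, dif_pos hd]
    by_cases hday : day - 1 = 0
    · rw [if_pos hday]
      by_cases hm : month - 1 = 0
      · rw [if_pos hm]
        rw [ih (days - 1) (calc_days_in_month 12) 12 (year - 1) hk (by constructor <;> norm_num [calc_days_in_month])]
        congr 1
        have e1 : dOrd (calc_days_in_month 12) 12 = 365 := by decide
        have e2 : dOrd day 1 = 1 := by
          rw [dOrd]; norm_num [cumB, List.getD]; omega
        have em : month = 1 := by omega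
        rw [e1, em, e2]; omega
      · rw [if_neg hm]
        have hinv' : invDM (calc_days_in_month (month - 1)) (month - 1) :=
          ⟨by omega, by omega, calc_pos _, le_refl _⟩
        rw [ih (days - 1) (calc_days_in_month (month - 1)) (month - 1) year hk hinv']
        congr 1
        -- dOrd (dim (month-1)) (month-1) = dOrd 1 month - 1
        have hkn : (month - 1).toNat < 12 ∧ 1 ≤ (month - 1).toNat := by omega
        have hdiff := cum_diff (month - 1).toNat (hkn.1) (hkn.2)
        have hcast : (((month - 1).toNat : Nat) : Int) = month - 1 := by omega
        rw [hcast] at hdiff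
        have ht1 : (month - 1 - 1).toNat = (month - 1).toNat - 1 := by omega
        rw [dOrd, dOrd, ht1]
        have hde : day = 1 := by omega
        rw [hde]
        omega
    · rw [if_neg hday]
      have hinv' : invDM (day - 1) month := ⟨h1, h2, by omega, by omega⟩
      rw [ih (days - 1) (day - 1) month year hk hinv']
      congr 1
      rw [dOrd, dOrd]
      omega

-- ===== VERDICT (by name: the statement is the Claim_ definition above) =====
theorem get_cutoff_date_spec : Claim_equal_get_cutoff_date := by
  intro days _
  unfold Spec_get_cutoff_date
  have hstart : get_cutoff_date days = get_cutoff_date_loop days 3 12 2024 := rfl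
  rw [hstart, loop_eq_from_ordinal days.toNat days 3 12 2024 rfl (by constructor <;> norm_num [calc_days_in_month])]
  unfold get_cutoff_date_alt
  congr 1
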